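-- pv_equiv track=rewrite | github.com/lulesna/studia | Python/steganografia-i-znaki-wodne/stegano.py | metoda_2_zanurzanie
-- ===== SOURCE A (Python) =====
-- def metoda_2_zanurzanie(nosnik, bity_wiadomosci):
--     # znalezienie wszystkich spacji (nie na końcach wierszy)
--     wiersze = nosnik.split('\n')
--
--     # usunięcie podwójnych spacji
--     wynik = []
--     for wiersz in wiersze:
--         wiersz = wiersz.rstrip()  # usunięcie spacji z końca
--         while '  ' in wiersz:
--             wiersz = wiersz.replace('  ', ' ')
--         wynik.append(wiersz)
--
--     # ukrywana wiadomość może być co najwyżej długości równej liczbie spacji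
--     liczba_spacji = 0
--     for wiersz in wynik:
--         liczba_spacji += wiersz.count(' ')
--
--     if len(bity_wiadomosci) > liczba_spacji:
--         raise ValueError("Ukrywana wiadomość jest za długa.")
--
--     # zakodowanie wiadomości
--     indeks_bitu = 0
--     koncowe_wiersze = []
--
--     for wiersz in wynik:
--         nowy_wiersz = ""
--         i = 0
--         while i < len(wiersz):
--             if wiersz[i] == ' ' and indeks_bitu < len(bity_wiadomosci):
--                 if bity_wiadomosci[indeks_bitu] == '1':
--                     nowy_wiersz += '  '  # podwójna spacja
--                 else:
--                     nowy_wiersz += ' '  # pojedyncza spacja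
--                 indeks_bitu += 1
--             else:
--                 nowy_wiersz += wiersz[i]
--             i += 1
--         koncowe_wiersze.append(nowy_wiersz)
--
--     return '\n'.join(koncowe_wiersze)
-- ===== SOURCE B (Python) =====
-- def metoda_2_zanurzanie(nosnik, bity_wiadomosci):
--     # phase 1: collapse runs of spaces (same while/replace collapse as the task describes),
--     # counting the remaining spaces in the same single pass
--     wynik = []
--     liczba_spacji = 0
--     for wiersz in nosnik.split('\n'):
--         wiersz = wiersz.rstrip()
--         while '  ' in wiersz:
--             wiersz = wiersz.replace('  ', ' ')
--         wynik.append(wiersz)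
--         liczba_spacji += wiersz.count(' ')
--
--     if len(bity_wiadomosci) > liczba_spacji:
--         raise ValueError("Ukrywana wiadomość jest za długa.")
--
--     # phase 2: split each line on single spaces and rejoin with per-gap separators,
--     # consuming one message bit per gap while bits remain (index threaded across lines)
--     k = 0
--     koncowe_wiersze = []
--     for wiersz in wynik:
--         tokeny = wiersz.split(' ')
--         nowy = tokeny[0]
--         for token in tokeny[1:]:
--             if k < len(bity_wiadomosci):
--                 nowy += ('  ' if bity_wiadomosci[k] == '1' else ' ') + token
--                 k += 1
--             else:
--                 nowy += ' ' + token
--         koncowe_wiersze.append(nowy)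
--     return '\n'.join(koncowe_wiersze)
-- ===== Notes on version B (the rewrite author's own statement) =====
-- stated objective: alternative
-- what changed: B fuses the collapse pass with the space count into one loop and replaces A's per-character walk with per-bit-state by splitting each collapsed line on single spaces and rejoining the tokens with per-gap separators chosen from the message bits (bit index threaded across lines).
import Mathlib
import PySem

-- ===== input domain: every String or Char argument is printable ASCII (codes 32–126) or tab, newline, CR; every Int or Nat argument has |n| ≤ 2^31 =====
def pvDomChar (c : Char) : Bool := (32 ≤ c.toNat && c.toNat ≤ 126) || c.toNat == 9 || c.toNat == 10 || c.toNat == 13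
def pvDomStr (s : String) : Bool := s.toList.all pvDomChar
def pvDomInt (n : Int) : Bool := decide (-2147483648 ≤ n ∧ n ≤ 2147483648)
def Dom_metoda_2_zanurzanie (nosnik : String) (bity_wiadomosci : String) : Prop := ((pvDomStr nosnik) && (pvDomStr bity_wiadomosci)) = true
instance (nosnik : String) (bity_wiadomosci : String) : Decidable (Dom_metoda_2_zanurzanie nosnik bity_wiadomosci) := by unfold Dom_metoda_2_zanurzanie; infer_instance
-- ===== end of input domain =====

-- B keeps A's collapse-and-count behaviour in one pass and replaces A's per-character
-- encoding walk by split-on-space / rejoin-with-per-gap-separators (objective: alternative).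


-- ===== PORT A =====
-- the 'while "  " in wiersz: wiersz = wiersz.replace("  ", " ")' loop; each replace
-- strictly shortens the string while the guard holds, so fuel = length + 1 never runs out
def pvCollapse : Nat → List Char → List Char
  | 0, w => w
  | fuel + 1, w =>
      if PySem.Chars.isIn [' ', ' '] w
      then pvCollapse fuel (PySem.Chars.replace w [' ', ' '] [' '])
      else w

-- one step of A's character walk: state = (nowy_wiersz, indeks_bitu)
def pvStepA (bits : List Char) (p : List Char × Nat) (c : Char) : List Char × Nat :=
  if c = ' ' ∧ p.2 < bits.length then
    (if bits.getD p.2 ' ' = '1' then p.1 ++ [' ', ' '] else p.1 ++ [' '], p.2 + 1)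
  else (p.1 ++ [c], p.2)

def metoda_2_zanurzanie (nosnik : String) (bity_wiadomosci : String) : String :=
  let bits := bity_wiadomosci.toList
  let wiersze := PySem.Chars.splitOn nosnik.toList ['\n']
  let wynik := wiersze.foldl (fun acc w =>
      let w := PySem.Chars.rstrip w
      acc ++ [pvCollapse (w.length + 1) w]) []
  let liczba_spacji := wynik.foldl (fun n w => n + PySem.Chars.count w [' ']) 0
  if bits.length > liczba_spacji then ""  -- Python raises ValueError here; excluded by Pre_
  else
    let r := wynik.foldl (fun (st : List (List Char) × Nat) w =>
        let e := w.foldl (pvStepA bits) ([], st.2)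
        (st.1 ++ [e.1], e.2)) ([], 0)
    String.ofList (PySem.Chars.join ['\n'] r.1)

-- ===== PORT B =====
-- one step of B's gap walk: state = (nowy, k); each token after the first is preceded
-- by a separator chosen from the next message bit (double space for '1') if bits remain
def pvStepB (bits : List Char) (p : List Char × Nat) (t : List Char) : List Char × Nat :=
  if p.2 < bits.length then
    ((if bits.getD p.2 ' ' = '1' then p.1 ++ [' ', ' '] else p.1 ++ [' ']) ++ t, p.2 + 1)
  else (p.1 ++ [' '] ++ t, p.2)

def metoda_2_zanurzanie_alt (nosnik : String) (bity_wiadomosci : String) : String :=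
  let bits := bity_wiadomosci.toList
  let st := (PySem.Chars.splitOn nosnik.toList ['\n']).foldl
      (fun (acc : List (List Char) × Nat) w =>
        let w := PySem.Chars.rstrip w
        let s := pvCollapse (w.length + 1) w
        (acc.1 ++ [s], acc.2 + PySem.Chars.count s [' '])) ([], 0)
  if bits.length > st.2 then ""  -- Python raises ValueError here; excluded by Pre_
  else
    let r := st.1.foldl (fun (q : List (List Char) × Nat) w =>
        let toks := PySem.Chars.splitOn w [' ']
        let e := toks.tail.foldl (pvStepB bits) (toks.headD [], q.2)
        (q.1 ++ [e.1], e.2)) ([], 0)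
    String.ofList (PySem.Chars.join ['\n'] r.1)

-- ===== PRECONDITION & SPEC =====
-- number of maximal runs of spaces in a line = number of spaces left after A's collapse
def pvRuns : List Char → Nat
  | [] => 0
  | [a] => if a = ' ' then 1 else 0
  | a :: b :: r => (if a = ' ' ∧ b ≠ ' ' then 1 else 0) + pvRuns (b :: r)

-- Pre_ excludes exactly the inputs on which A raises ValueError: a message longer than the
-- number of space runs left after rstripping each line (= spaces after collapsing).
def Pre_metoda_2_zanurzanie (nosnik : String) (bity_wiadomosci : String) : Prop :=
  bity_wiadomosci.toList.length ≤
    ((PySem.Chars.splitOn nosnik.toList ['\n']).map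
      (fun w => pvRuns (PySem.Chars.rstrip w))).sum

instance (nosnik : String) (bity_wiadomosci : String) : Decidable (Pre_metoda_2_zanurzanie nosnik bity_wiadomosci) := by unfold Pre_metoda_2_zanurzanie; infer_instance

def pvWitness_metoda_2_zanurzanie : String × String := ("ab cd  ef", "10")

def Spec_metoda_2_zanurzanie (nosnik : String) (bity_wiadomosci : String) (out : String) : Prop := out = metoda_2_zanurzanie_alt nosnik bity_wiadomosci
instance (nosnik : String) (bity_wiadomosci : String) (out : String) : Decidable (Spec_metoda_2_zanurzanie nosnik bity_wiadomosci out) := by unfold Spec_metoda_2_zanurzanie; infer_instance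

-- ===== CLAIM (what is proved, stated in full; the proofs are below) =====
def Claim_equal_metoda_2_zanurzanie : Prop := ∀ (nosnik : String) (bity_wiadomosci : String), Dom_metoda_2_zanurzanie nosnik bity_wiadomosci → Pre_metoda_2_zanurzanie nosnik bity_wiadomosci → Spec_metoda_2_zanurzanie nosnik bity_wiadomosci (metoda_2_zanurzanie nosnik bity_wiadomosci)

-- ===== LEMMAS AND PROOFS =====

-- simple structural form of split-on-single-space
def pvSos : List Char → List (List Char)
  | [] => [[]]
  | c :: r => if c = ' ' then [] :: pvSos r else (c :: (pvSos r).headD []) :: (pvSos r).tail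

theorem pvSos_space (r : List Char) : pvSos (' ' :: r) = [] :: pvSos r := by
  simp [pvSos]

theorem pvSos_nonspace {c : Char} (r : List Char) (hc : c ≠ ' ') :
    pvSos (c :: r) = (c :: (pvSos r).headD []) :: (pvSos r).tail := by
  simp [pvSos, hc]

theorem pvSos_cons_form (w : List Char) : pvSos w = (pvSos w).headD [] :: (pvSos w).tail := by
  cases w with
  | nil => rfl
  | cons c r =>
    by_cases hc : c = ' '
    · subst hc; rw [pvSos_space]; rfl
    · rw [pvSos_nonspace r hc]; rfl

theorem pvSplitOn_go_eq (l : List Char) : ∀ (fuel : Nat) (cur : List Char) (acc : List (List Char)),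
    l.length ≤ fuel →
    PySem.Chars.splitOn.go [' '] fuel l cur acc
      = acc.reverse ++ ((cur.reverse ++ (pvSos l).headD []) :: (pvSos l).tail) := by
  induction l with
  | nil =>
    intro fuel cur acc _
    cases fuel <;> simp [PySem.Chars.splitOn.go, pvSos]
  | cons c rest ih =>
    intro fuel cur acc h
    cases fuel with
    | zero => simp at h
    | succ f =>
      have hrest : rest.length ≤ f := by simp at h; omega
      by_cases hc : c = ' '
      · subst hc
        have hpre : [' '].isPrefixOf (' ' :: rest) = true := by simp [List.isPrefixOf]
        rw [PySem.Chars.splitOn.go, if_pos hpre,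
            show List.drop ([' '] : List Char).length (' ' :: rest) = rest from rfl,
            ih f [] (cur.reverse :: acc) hrest, pvSos_space]
        rw [pvSos_cons_form rest]
        simp
      · have hpre : [' '].isPrefixOf (c :: rest) = false := by
          simp [List.isPrefixOf]; exact fun h' => hc h'.symm
        rw [PySem.Chars.splitOn.go, if_neg (by simp [hpre]), ih f (c :: cur) acc hrest,
            pvSos_nonspace rest hc]
        simp

theorem pvSplitOn_space (w : List Char) : PySem.Chars.splitOn w [' '] = pvSos w := by
  unfold PySem.Chars.splitOn
  rw [pvSplitOn_go_eq w (w.length + 1) [] [] (Nat.le_succ _)]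
  simp only [List.reverse_nil, List.nil_append]
  exact (pvSos_cons_form w).symm

-- the split/rejoin gap walk equals A's per-character walk, for every line and start index
theorem pvEnc_eq (bits : List Char) (w : List Char) : ∀ (pre : List Char) (k : Nat),
    (pvSos w).tail.foldl (pvStepB bits) (pre ++ (pvSos w).headD [], k)
      = w.foldl (pvStepA bits) (pre, k) := by
  induction w with
  | nil => intro pre k; simp [pvSos]
  | cons c rest ih =>
    intro pre k
    by_cases hc : c = ' '
    · subst hc
      rw [pvSos_space, List.tail_cons, List.headD_cons, List.append_nil,
          pvSos_cons_form rest, List.foldl_cons, List.foldl_cons]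
      by_cases hk : k < bits.length
      · rw [show pvStepB bits (pre, k) ((pvSos rest).headD [])
              = ((if bits.getD k ' ' = '1' then pre ++ [' ', ' '] else pre ++ [' ']) ++ (pvSos rest).headD [], k + 1)
            from by simp [pvStepB, hk],
            show pvStepA bits (pre, k) ' '
              = (if bits.getD k ' ' = '1' then pre ++ [' ', ' '] else pre ++ [' '], k + 1)
            from by simp [pvStepA, hk]]
        exact ih (if bits.getD k ' ' = '1' then pre ++ [' ', ' '] else pre ++ [' ']) (k + 1)
      · rw [show pvStepB bits (pre, k) ((pvSos rest).headD [])
              = (pre ++ [' '] ++ (pvSos rest).headD [], k) from by simp [pvStepB, hk],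
            show pvStepA bits (pre, k) ' ' = (pre ++ [' '], k) from by simp [pvStepA, hk]]
        exact ih (pre ++ [' ']) k
    · rw [pvSos_nonspace rest hc, List.tail_cons, List.headD_cons, List.foldl_cons,
          show pvStepA bits (pre, k) c = (pre ++ [c], k) from by simp [pvStepA, hc],
          show pre ++ (c :: (pvSos rest).headD []) = (pre ++ [c]) ++ (pvSos rest).headD []
            from by simp]
      exact ih (pre ++ [c]) k

-- B's fused collapse-and-count pass, split into A's two passes
theorem pvPhase1 (f : List Char → List Char) : ∀ (ws : List (List Char)) (acc : List (List Char)) (n : Nat),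
    ws.foldl (fun (a : List (List Char) × Nat) w => (a.1 ++ [f w], a.2 + PySem.Chars.count (f w) [' '])) (acc, n)
      = (ws.foldl (fun a w => a ++ [f w]) acc,
         (ws.map f).foldl (fun m w => m + PySem.Chars.count w [' ']) n) := by
  intro ws
  induction ws with
  | nil => intro acc n; rfl
  | cons w rest ih => intro acc n; simpa using ih (acc ++ [f w]) (n + PySem.Chars.count (f w) [' '])

-- the outer encoding loops agree line by line
theorem pvPhase2 (bits : List Char) : ∀ (lines : List (List Char)) (q : List (List Char) × Nat),
    lines.foldl (fun (q : List (List Char) × Nat) w =>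
        (q.1 ++ [(List.foldl (pvStepB bits) ((PySem.Chars.splitOn w [' ']).headD [], q.2)
                    (PySem.Chars.splitOn w [' ']).tail).1],
         (List.foldl (pvStepB bits) ((PySem.Chars.splitOn w [' ']).headD [], q.2)
                    (PySem.Chars.splitOn w [' ']).tail).2)) q
      = lines.foldl (fun (st : List (List Char) × Nat) w =>
        (st.1 ++ [(List.foldl (pvStepA bits) ([], st.2) w).1],
         (List.foldl (pvStepA bits) ([], st.2) w).2)) q := by
  intro lines
  induction lines with
  | nil => intro q; rfl
  | cons w rest ih =>
    intro q
    have h : (PySem.Chars.splitOn w [' ']).tail.foldl (pvStepB bits)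
        ((PySem.Chars.splitOn w [' ']).headD [], q.2) = w.foldl (pvStepA bits) ([], q.2) := by
      rw [pvSplitOn_space]
      simpa using pvEnc_eq bits w [] q.2
    simp only [List.foldl_cons, h]
    exact ih _

-- ===== VERDICT (by name: the statement is the Claim_ definition above) =====
theorem metoda_2_zanurzanie_spec : Claim_equal_metoda_2_zanurzanie := by
  intro nosnik bity_wiadomosci _ _
  unfold Spec_metoda_2_zanurzanie metoda_2_zanurzanie metoda_2_zanurzanie_alt
  simp only []
  rw [pvPhase1 (fun w => pvCollapse ((PySem.Chars.rstrip w).length + 1) (PySem.Chars.rstrip w))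
        (PySem.Chars.splitOn nosnik.toList ['\n']) [] 0]
  rw [PySem.List.foldl_append_singleton_eq_map]
  rw [pvPhase2]
  simp
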